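-- pv_equiv track=rewrite | github.com/skywind3000/markpress | lib/utils.py | _fenced_code_block
-- ===== SOURCE A (Python) =====
-- def _fenced_code_block (content):
--     output = []
--     source = []
--     state = 0
--     mark = ''
--     lang = None
--     for line in content.split('\n'):
--         line = line.rstrip('\r\n\t ')
--         if state == 0:
--             if not line.startswith('```'):
--                 output.append(line)
--                 continue
--             test = line.lstrip('`')
--             size = len(line) - len(test)
--             mark = '`' * size
--             lang = test.strip()
--             state = 1
--             source = []
--         elif state == 1:
--             if line != mark:
--                 source.append(line)
--                 continue
--             src = '\n'.join(source).strip('\n')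
--             head = '<pre><code>'
--             if lang:
--                 head = '<pre><code class="%s">'%lang
--             replacements = [
--                 ("&amp;", "&"),
--                 ("&lt;", "<"),
--                 ("&gt;", ">")
--             ]
--             for new, old in replacements:
--                 src = src.replace(old, new)
--             output.append(head + src)
--             output.append('</code></pre>')
--             state = 0
--     return '\n'.join(output)
-- ===== SOURCE B (Python) =====
-- def _fenced_code_block(content):
--     lines = [ln.rstrip('\r\n\t ') for ln in content.split('\n')]
--     n = len(lines)
--     # Phase 1: build an index of code blocks as (open, close, lang) triples;
--     # `cut` is where plain output stops (start of an unterminated fence, else n).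
--     blocks = []
--     cut = n
--     pos = 0
--     while pos < n:
--         ln = lines[pos]
--         if not ln.startswith('```'):
--             pos += 1
--             continue
--         test = ln.lstrip('`')
--         mark = '`' * (len(ln) - len(test))
--         tail = lines[pos + 1:]
--         if mark not in tail:
--             cut = pos
--             break
--         c = pos + 1 + tail.index(mark)
--         blocks.append((pos, c, test.strip()))
--         pos = c + 1
--     # Phase 2: render by slicing between the recorded block boundaries.
--     out = []
--     prev = 0
--     for o, c, lang in blocks:
--         out += lines[prev:o]
--         src = '\n'.join(lines[o + 1:c]).strip('\n')
--         src = src.replace('&', '&amp;').replace('<', '&lt;').replace('>', '&gt;')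
--         head = '<pre><code class="%s">' % lang if lang else '<pre><code>'
--         out += [head + src, '</code></pre>']
--         prev = c + 1
--     out += lines[prev:cut]
--     return '\n'.join(out)
-- ===== Notes on version B (the rewrite author's own statement) =====
-- stated objective: alternative
-- what changed: Replaced A's single-pass state machine (state flag with mark/lang/source carried across the loop) by two staged passes: phase 1 builds an index of block boundaries as (open, close, lang) triples using list.index on the tail slice to locate each closing fence, phase 2 renders the output purely by slicing between the recorded boundaries.
import Mathlib
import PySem

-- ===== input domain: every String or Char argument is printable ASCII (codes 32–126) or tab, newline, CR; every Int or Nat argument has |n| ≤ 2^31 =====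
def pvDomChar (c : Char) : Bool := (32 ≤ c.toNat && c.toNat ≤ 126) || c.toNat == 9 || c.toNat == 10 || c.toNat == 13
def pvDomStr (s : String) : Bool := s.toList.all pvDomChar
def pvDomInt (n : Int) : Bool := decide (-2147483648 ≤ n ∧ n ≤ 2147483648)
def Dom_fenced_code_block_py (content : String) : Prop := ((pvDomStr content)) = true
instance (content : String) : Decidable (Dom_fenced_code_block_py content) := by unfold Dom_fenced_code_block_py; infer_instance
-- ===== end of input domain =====

-- B replaces A's single-pass state machine by two staged passes: an index of
-- block boundaries (open, close, lang) built with list.index on tail slices,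
-- then slice-based rendering between the recorded boundaries. Same cost.

-- line.rstrip('\r\n\t ')  (exact: drops exactly those trailing characters)
def pvLineStrip (s : String) : String :=
  String.ofList ((s.toList.reverse.dropWhile (fun c => c == '\r' || c == '\n' || c == '\t' || c == ' ')).reverse)

-- src.replace('&','&amp;').replace('<','&lt;').replace('>','&gt;') in this order
def pvEscape (src : String) : String :=
  PySem.Str.replace (PySem.Str.replace (PySem.Str.replace src "&" "&amp;") "<" "&lt;") ">" "&gt;"

-- ===== PORT A =====
-- A's for-loop as structural recursion over the remaining lines, carrying the same
-- state (state flag, output, source, mark, lang); lang is Option (Python None).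
def fencedLoopA : Nat → List String → List String → String → Option String → List String → List String
  | _, output, _, _, _, [] => output
  | state, output, source, mark, lang, raw :: rest =>
    let line := pvLineStrip raw
    if state = 0 then
      if ¬ PySem.Str.startswith line "```" then
        fencedLoopA 0 (output ++ [line]) source mark lang rest
      else
        let test := String.ofList (line.toList.dropWhile (· == '`'))  -- line.lstrip('`'), exact
        let size := line.toList.length - test.toList.length
        fencedLoopA 1 output [] (String.ofList (List.replicate size '`')) (some (PySem.Str.strip test)) rest
    else
      if line ≠ mark then
        fencedLoopA 1 output (source ++ [line]) mark lang rest
      else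
        let src := pvEscape (PySem.Str.stripChars (PySem.Str.join "\n" source) "\n")
        let head := if lang.getD "" ≠ "" then "<pre><code class=\"" ++ lang.getD "" ++ "\">" else "<pre><code>"
        fencedLoopA 0 (output ++ [head ++ src, "</code></pre>"]) source mark lang rest

def fenced_code_block_py (content : String) : String :=
  PySem.Str.join "\n" (fencedLoopA 0 [] [] "" none ((PySem.Str.split? content "\n").getD []))

-- ===== PORT B =====
-- Phase 1 (Source B's first while loop): scan from index pos over the pre-stripped
-- lines, recording each block as (open, close, lang); returns (blocks, cut)
-- where cut is the start of an unterminated fence (else len(lines)).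
-- 'mark not in tail' / 'tail.index(mark)' are ported together as one index? match;
-- lines[pos+1:] with a nonneg index is exactly List.drop.
def pvPhase1 (lines : List String) (pos : Nat) : List (Nat × Nat × String) × Nat :=
  if h : pos < lines.length then
    let ln := lines[pos]
    if ¬ PySem.Str.startswith ln "```" then pvPhase1 lines (pos + 1)
    else
      let test := String.ofList (ln.toList.dropWhile (· == '`'))  -- ln.lstrip('`'), exact
      let mark := String.ofList (List.replicate (ln.toList.length - test.toList.length) '`')
      let tail := lines.drop (pos + 1)
      match PySem.List.index? tail mark with
      | none => ([], pos)
      | some k =>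
        let c := pos + 1 + k
        let r := pvPhase1 lines (c + 1)
        ((pos, c, PySem.Str.strip test) :: r.1, r.2)
  else ([], lines.length)
termination_by lines.length - pos
decreasing_by all_goals omega

-- Phase 2 (Source B's for loop over blocks, with the trailing lines[prev:cut]):
-- lines[a:b] with 0 ≤ a ≤ b is exactly (drop a).take (b - a).
def pvPhase2 (lines : List String) (cut : Nat) : List (Nat × Nat × String) → Nat → List String
  | [], prev => (lines.drop prev).take (cut - prev)
  | (o, c, lang) :: bs, prev =>
    let src := pvEscape (PySem.Str.stripChars (PySem.Str.join "\n" ((lines.drop (o + 1)).take (c - (o + 1)))) "\n")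
    let head := if lang ≠ "" then "<pre><code class=\"" ++ lang ++ "\">" else "<pre><code>"
    ((lines.drop prev).take (o - prev)) ++ [head ++ src, "</code></pre>"] ++ pvPhase2 lines cut bs (c + 1)

def fenced_code_block_py_alt (content : String) : String :=
  let lines := ((PySem.Str.split? content "\n").getD []).map pvLineStrip
  let r := pvPhase1 lines 0
  PySem.Str.join "\n" (pvPhase2 lines r.2 r.1 0)

-- ===== PRECONDITION & SPEC =====
def Spec_fenced_code_block_py (content : String) (out : String) : Prop := out = fenced_code_block_py_alt content
instance (content : String) (out : String) : Decidable (Spec_fenced_code_block_py content out) := by unfold Spec_fenced_code_block_py; infer_instance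

-- ===== CLAIM (what is proved, stated in full; the proofs are below) =====
def Claim_equal_fenced_code_block_py : Prop := ∀ (content : String), Dom_fenced_code_block_py content → Spec_fenced_code_block_py content (fenced_code_block_py content)

-- ===== LEMMAS AND PROOFS =====

-- Proof-only structural middle form: process a list of (already stripped) lines.
def pvScanClose (mark : String) : List String → Option (List String × List String)
  | [] => none
  | l :: rest =>
    if l = mark then some ([], rest)
    else
      match pvScanClose mark rest with
      | none => none
      | some (src, rest') => some (l :: src, rest')

theorem pvScanClose_length {mark : String} : ∀ {lines : List String} {src rest' : List String},
    pvScanClose mark lines = some (src, rest') → rest'.length < lines.length := by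
  intro lines
  induction lines with
  | nil => intro src rest' h; simp [pvScanClose] at h
  | cons l rest ih =>
    intro src rest' h
    simp only [pvScanClose] at h
    split at h
    · cases h; simp
    · cases hrec : pvScanClose mark rest with
      | none => rw [hrec] at h; cases h
      | some p =>
        rw [hrec] at h
        cases h
        exact Nat.lt_trans (ih hrec) (by simp)

def fencedB : List String → List String
  | [] => []
  | l :: rest =>
    if ¬ PySem.Str.startswith l "```" then l :: fencedB rest
    else
      let test := String.ofList (l.toList.dropWhile (· == '`'))
      let mark := String.ofList (List.replicate (l.toList.length - test.toList.length) '`')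
      let lang := PySem.Str.strip test
      match h : pvScanClose mark rest with
      | none => []
      | some (src, rest') =>
        let body := pvEscape (PySem.Str.stripChars (PySem.Str.join "\n" src) "\n")
        let head := if lang ≠ "" then "<pre><code class=\"" ++ lang ++ "\">" else "<pre><code>"
        (head ++ body) :: "</code></pre>" :: fencedB rest'
termination_by lines => lines.length
decreasing_by
  · simp
  · exact Nat.lt_trans (pvScanClose_length h) (by simp)

-- ===== A-side: fencedLoopA equals fencedB on the stripped lines =====
def pvTail1 (source : List String) (mark : String) (lang : Option String) (lines : List String) : List String :=
  match pvScanClose mark lines with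
  | none => []
  | some (src, rest') =>
    let body := pvEscape (PySem.Str.stripChars (PySem.Str.join "\n" (source ++ src)) "\n")
    let head := if lang.getD "" ≠ "" then "<pre><code class=\"" ++ lang.getD "" ++ "\">" else "<pre><code>"
    (head ++ body) :: "</code></pre>" :: fencedB rest'

theorem fencedB_fence (l : String) (rest : List String)
    (hs : PySem.Str.startswith l "```" = true) :
    fencedB (l :: rest) =
      pvTail1 []
        (String.ofList (List.replicate (l.toList.length -
          (String.ofList (l.toList.dropWhile (· == '`'))).toList.length) '`'))
        (some (PySem.Str.strip (String.ofList (l.toList.dropWhile (· == '`'))))) rest := by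
  rw [fencedB.eq_def]
  dsimp only
  rw [if_neg (by simpa using hs)]
  unfold pvTail1
  split <;> rename_i h' <;> simp at h' <;> simp [h']

theorem fencedB_plain (l : String) (rest : List String)
    (hs : ¬ PySem.Str.startswith l "```" = true) :
    fencedB (l :: rest) = l :: fencedB rest := by
  rw [fencedB.eq_def]
  dsimp only
  rw [if_pos hs]

theorem fencedLoopA_eq : ∀ (raws : List String) (out source : List String) (mark : String) (lang : Option String),
    (fencedLoopA 0 out source mark lang raws = out ++ fencedB (raws.map pvLineStrip)) ∧
    (fencedLoopA 1 out source mark lang raws = out ++ pvTail1 source mark lang (raws.map pvLineStrip)) := by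
  intro raws
  induction raws with
  | nil =>
    intro out source mark lang
    constructor
    · simp [fencedLoopA, fencedB]
    · simp [fencedLoopA, pvTail1, pvScanClose]
  | cons raw rest ih =>
    intro out source mark lang
    constructor
    · -- state 0
      by_cases hs : PySem.Str.startswith (pvLineStrip raw) "```" = true
      · simp only [fencedLoopA, List.map_cons, hs, Bool.not_true, reduceIte]
        rw [(ih out [] _ _).2, fencedB_fence _ _ hs]
        simp
      · simp only [fencedLoopA, fencedB, List.map_cons, hs, ite_true, Bool.not_eq_true] at *
        rw [(ih (out ++ [pvLineStrip raw]) source mark lang).1]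
        simp
    · -- state 1
      by_cases he : pvLineStrip raw = mark
      · simp only [fencedLoopA, he, ne_eq, not_true, ite_false, Nat.one_ne_zero]
        rw [(ih _ source mark lang).1]
        simp [pvTail1, pvScanClose, he]
      · simp only [fencedLoopA, he, ne_eq, not_false_iff, ite_true, reduceIte, Nat.one_ne_zero]
        rw [(ih out (source ++ [pvLineStrip raw]) mark lang).2]
        simp only [pvTail1, List.map_cons, pvScanClose, he, ite_false]
        cases hrec : pvScanClose mark (rest.map pvLineStrip) with
        | none => simp
        | some p => cases p; simp

-- ===== B-side: pvPhase2 ∘ pvPhase1 equals fencedB on every suffix =====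
theorem pvScanClose_eq_index? (mark : String) : ∀ (l : List String),
    pvScanClose mark l = (PySem.List.index? l mark).map (fun k => (l.take k, l.drop (k + 1))) := by
  intro l
  induction l with
  | nil => simp [pvScanClose, PySem.List.index?]
  | cons x xs ih =>
    by_cases hx : x = mark
    · subst hx
      rw [PySem.List.index?_cons_self]
      simp [pvScanClose]
    · rw [PySem.List.index?_cons_of_ne xs hx]
      simp only [pvScanClose, hx, ite_false, ih]
      cases PySem.List.index? xs mark with
      | none => simp
      | some k => simp

def pvFirst : List (Nat × Nat × String) → Nat → Nat
  | [], cut => cut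
  | (o, _, _) :: _, _ => o

theorem index?_lt_length {α : Type} [DecidableEq α] {l : List α} {v : α} {k : Nat}
    (h : PySem.List.index? l v = some k) : k < l.length := by
  obtain ⟨hk, -⟩ := PySem.List.getElem_of_index?_eq_some h
  exact hk

theorem pvPhase1_le (lines : List String) : ∀ (fuel pos : Nat), lines.length - pos ≤ fuel →
    pos ≤ lines.length → pos ≤ pvFirst (pvPhase1 lines pos).1 (pvPhase1 lines pos).2 := by
  intro fuel
  induction fuel with
  | zero =>
    intro pos hf hle
    have : pos = lines.length := by omega
    subst this
    rw [pvPhase1]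
    simp [pvFirst]
  | succ m ih =>
    intro pos hf hle
    rw [pvPhase1]
    by_cases h : pos < lines.length
    · rw [dif_pos h]
      by_cases hs : PySem.Str.startswith lines[pos] "```" = true
      · simp only [hs, Bool.not_true, reduceIte]
        cases hidx : PySem.List.index? (lines.drop (pos + 1))
            (String.ofList (List.replicate (lines[pos].toList.length -
              (String.ofList (lines[pos].toList.dropWhile (· == '`'))).toList.length) '`')) with
        | none => simp [pvFirst]
        | some k => simp [pvFirst]
      · simp only [hs, ite_true, Bool.not_eq_true]
        have := ih (pos + 1) (by omega) (by omega)
        omega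
    · rw [dif_neg h]
      simpa [pvFirst] using hle

theorem pvPhase_eq (lines : List String) : ∀ (fuel pos : Nat), lines.length - pos ≤ fuel →
    pos ≤ lines.length →
    pvPhase2 lines (pvPhase1 lines pos).2 (pvPhase1 lines pos).1 pos = fencedB (lines.drop pos) := by
  intro fuel
  induction fuel with
  | zero =>
    intro pos hf hle
    have : pos = lines.length := by omega
    subst this
    rw [pvPhase1]
    simp [pvPhase2, fencedB]
  | succ m ih =>
    intro pos hf hle
    by_cases h : pos < lines.length
    · have hdrop : lines.drop pos = lines[pos] :: lines.drop (pos + 1) :=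
        List.drop_eq_getElem_cons h
      rw [pvPhase1, dif_pos h]
      by_cases hs : PySem.Str.startswith lines[pos] "```" = true
      · -- fence line
        dsimp only
        rw [if_neg (by simpa using hs)]
        rw [hdrop, fencedB_fence _ _ hs]
        unfold pvTail1
        rw [pvScanClose_eq_index?]
        cases hidx : PySem.List.index? (lines.drop (pos + 1))
            (String.ofList (List.replicate (lines[pos].toList.length -
              (String.ofList (lines[pos].toList.dropWhile (· == '`'))).toList.length) '`')) with
        | none => simp [pvPhase2]
        | some k =>
          have hk : k < (lines.drop (pos + 1)).length := index?_lt_length hidx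
          have hk' : pos + 1 + k < lines.length := by
            simp [List.length_drop] at hk; omega
          have hrec := ih (pos + 1 + k + 1) (by omega) (by omega)
          simp only [Option.map_some, pvPhase2]
          rw [hrec]
          have h2 : (lines.drop (pos + 1)).take (pos + 1 + k - (pos + 1)) =
              (lines.drop (pos + 1)).take k := by congr 1; omega
          have h3 : (lines.drop (pos + 1)).drop (k + 1) = lines.drop (pos + 1 + k + 1) := by
            rw [List.drop_drop]; congr 1 <;> omega
          rw [h2, h3]
          simp
      · -- plain line
        dsimp only
        rw [if_pos hs]
        rw [hdrop, fencedB_plain _ _ hs, ← ih (pos + 1) (by omega) (by omega)]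
        have hfirst := pvPhase1_le lines (lines.length) (pos + 1) (by omega) (by omega)
        cases hbs : (pvPhase1 lines (pos + 1)).1 with
        | nil =>
          rw [hbs] at hfirst
          simp only [pvFirst] at hfirst
          simp only [pvPhase2, hbs]
          rw [hdrop]
          have : (lines[pos] :: lines.drop (pos + 1)).take ((pvPhase1 lines (pos + 1)).2 - pos) =
              lines[pos] :: (lines.drop (pos + 1)).take ((pvPhase1 lines (pos + 1)).2 - (pos + 1)) := by
            have hc : (pvPhase1 lines (pos + 1)).2 - pos =
                ((pvPhase1 lines (pos + 1)).2 - (pos + 1)) + 1 := by omega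
            rw [hc, List.take_succ_cons]
          rw [this]
        | cons b bs =>
          obtain ⟨o, c, lang⟩ := b
          rw [hbs] at hfirst
          simp only [pvFirst] at hfirst
          simp only [pvPhase2, hbs]
          rw [hdrop]
          have : (lines[pos] :: lines.drop (pos + 1)).take (o - pos) =
              lines[pos] :: (lines.drop (pos + 1)).take (o - (pos + 1)) := by
            have hc : o - pos = (o - (pos + 1)) + 1 := by omega
            rw [hc, List.take_succ_cons]
          rw [this]
          simp
    · have : pos = lines.length := by omega
      subst this
      rw [pvPhase1]
      simp [pvPhase2, fencedB]

-- ===== VERDICT (by name: the statement is the Claim_ definition above) =====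
theorem fenced_code_block_py_spec : Claim_equal_fenced_code_block_py := by
  intro content _
  unfold Spec_fenced_code_block_py fenced_code_block_py fenced_code_block_py_alt
  rw [(fencedLoopA_eq ((PySem.Str.split? content "\n").getD []) [] [] "" none).1]
  dsimp only
  rw [pvPhase_eq (((PySem.Str.split? content "\n").getD []).map pvLineStrip)
      ((((PySem.Str.split? content "\n").getD []).map pvLineStrip).length) 0 (by omega) (by omega)]
  simp
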